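-- pv_equiv track=rewrite | github.com/Ghxst/python-chrome-devtools-protocol | build/generate.py | docstring
-- ===== SOURCE A (Python) =====
-- def docstring(description, indent=4):
--     '''
--     Generate a docstring from a description.
--
--     :param str description:
--     :param int indent: the number of spaces to indent the docstring
--     '''
--     if not description:
--         return ''
--
--     i = ' ' * indent
--     start_stop = "{}'''".format(i)
--     lines = [start_stop]
--     for line in description.split('\n'):
--         lines.append('{}{}'.format(i, line))
--     lines.append(start_stop)
--     return '\n'.join(lines) + '\n'
-- ===== SOURCE B (Python) =====
-- def docstring(description, indent=4):
--     if not description: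
--         return ''
--     i = ' ' * indent
--     body = i + description.replace('\n', '\n' + i)
--     return "{0}'''\n{1}\n{0}'''\n".format(i, body)
-- ===== Notes on version B (the rewrite author's own statement) =====
-- stated objective: simpler
-- what changed: A splits the description into lines and appends each indented line to a list in a loop before joining; B indents the whole body at once with a single string replace that inserts the indent after every newline, and assembles the result in one format expression, with no list or loop.
import Mathlib
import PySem

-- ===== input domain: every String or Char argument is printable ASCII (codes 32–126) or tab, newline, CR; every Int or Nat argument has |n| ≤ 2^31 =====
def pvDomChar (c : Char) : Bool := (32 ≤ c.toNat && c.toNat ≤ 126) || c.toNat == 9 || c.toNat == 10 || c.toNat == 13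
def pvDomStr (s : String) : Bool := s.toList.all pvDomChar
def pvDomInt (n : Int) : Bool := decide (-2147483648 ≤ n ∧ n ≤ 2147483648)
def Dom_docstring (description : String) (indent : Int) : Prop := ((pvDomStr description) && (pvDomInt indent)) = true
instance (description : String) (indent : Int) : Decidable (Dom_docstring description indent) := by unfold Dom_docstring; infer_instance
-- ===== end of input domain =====

-- B replaces A's split-into-lines loop by a single string replacement that indents
-- the whole body at once (objective: simpler; same return value everywhere).

-- ===== PORT A =====
-- A: split description on '\n', build the list of indented lines between the
-- two quote lines with a loop, join with '\n' and add a trailing newline.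
def docstring (description : String) (indent : Int) : String :=
  if description.toList = [] then ""
  else
    let i : List Char := PySem.List.pyRepeat [' '] indent
    let start_stop : List Char := i ++ "'''".toList
    let lines0 : List (List Char) := [start_stop]
    let lines1 : List (List Char) :=
      (PySem.Chars.splitOn description.toList "\n".toList).foldl
        (fun acc line => acc ++ [i ++ line]) lines0
    let lines2 : List (List Char) := lines1 ++ [start_stop]
    String.mk (PySem.Chars.join "\n".toList lines2 ++ "\n".toList)

-- ===== PORT B =====
-- B: indent the body in one replace pass and assemble the result in one expression.
def docstring_alt (description : String) (indent : Int) : String :=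
  if description.toList = [] then ""
  else
    let i : List Char := PySem.List.pyRepeat [' '] indent
    let body : List Char :=
      i ++ PySem.Chars.replace description.toList "\n".toList ("\n".toList ++ i)
    String.mk (i ++ "'''".toList ++ "\n".toList ++ body ++ "\n".toList
               ++ i ++ "'''".toList ++ "\n".toList)

-- ===== PRECONDITION & SPEC =====
def Spec_docstring (description : String) (indent : Int) (out : String) : Prop := out = docstring_alt description indent
instance (description : String) (indent : Int) (out : String) : Decidable (Spec_docstring description indent out) := by unfold Spec_docstring; infer_instance

-- ===== CLAIM (what is proved, stated in full; the proofs are below) =====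
def Claim_equal_docstring : Prop := ∀ (description : String) (indent : Int), Dom_docstring description indent → Spec_docstring description indent (docstring description indent)

-- ===== LEMMAS AND PROOFS =====

/-- The indented body: every char copied, each newline followed by the indent `i`. -/
def pvIndentBody (i : List Char) : List Char → List Char
  | [] => []
  | c :: t => if c = '\n' then '\n' :: (i ++ pvIndentBody i t) else c :: pvIndentBody i t

/-- The pieces `splitOn` produces, with the in-progress (reversed) piece `cur`. -/
def pvPieces (cur : List Char) : List Char → List (List Char)
  | [] => [cur.reverse]
  | c :: t => if c = '\n' then cur.reverse :: pvPieces [] t else pvPieces (c :: cur) t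

theorem pvPieces_ne_nil (cur l : List Char) : pvPieces cur l ≠ [] := by
  induction l generalizing cur with
  | nil => simp [pvPieces]
  | cons c t ih => by_cases h : c = '\n' <;> simp [pvPieces, h, ih]

theorem pvReplaceGo_spec (i : List Char) (l : List Char) :
    ∀ (fuel : Nat) (acc : List Char), l.length ≤ fuel →
      PySem.Chars.replace.go "\n".toList ('\n' :: i) fuel l acc
        = acc.reverse ++ pvIndentBody i l := by
  induction l with
  | nil =>
    intro fuel acc _
    cases fuel <;> simp [PySem.Chars.replace.go, pvIndentBody]
  | cons c t ih =>
    intro fuel acc hf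
    cases fuel with
    | zero => simp at hf
    | succ f =>
      by_cases h : c = '\n'
      · subst h
        simp only [PySem.Chars.replace.go]
        rw [if_pos (show ("\n".toList).isPrefixOf ('\n' :: t) = true from by
          simp [List.isPrefixOf])]
        rw [show List.drop ("\n".toList).length ('\n' :: t) = t from by simp]
        rw [show ('\n' :: i).reverse ++ acc = i.reverse ++ ('\n' :: acc) from by simp]
        rw [ih f (i.reverse ++ '\n' :: acc) (by simpa using hf)]
        simp [pvIndentBody]
      · simp only [PySem.Chars.replace.go]
        rw [if_neg (show ¬ (("\n".toList).isPrefixOf (c :: t) = true) from by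
          simp [List.isPrefixOf]
          exact fun hc => h hc.symm)]
        rw [ih f (c :: acc) (by simpa using hf)]
        simp [pvIndentBody, h]

theorem pvReplace_eq (i cs : List Char) :
    PySem.Chars.replace cs "\n".toList ("\n".toList ++ i) = pvIndentBody i cs := by
  have hni : ("\n".toList ++ i) = ('\n' :: i) := by simp
  rw [PySem.Chars.replace, hni]
  rw [if_neg (show ¬ (("\n".toList).isEmpty = true) from by simp)]
  simpa using pvReplaceGo_spec i cs cs.length [] le_rfl

theorem pvSplitGo_spec (l : List Char) :
    ∀ (fuel : Nat) (cur : List Char) (acc : List (List Char)), l.length ≤ fuel →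
      PySem.Chars.splitOn.go "\n".toList fuel l cur acc
        = acc.reverse ++ pvPieces cur l := by
  induction l with
  | nil =>
    intro fuel cur acc _
    cases fuel <;> simp [PySem.Chars.splitOn.go, pvPieces]
  | cons c t ih =>
    intro fuel cur acc hf
    cases fuel with
    | zero => simp at hf
    | succ f =>
      by_cases h : c = '\n'
      · subst h
        simp only [PySem.Chars.splitOn.go]
        rw [if_pos (show ("\n".toList).isPrefixOf ('\n' :: t) = true from by
          simp [List.isPrefixOf])]
        rw [show List.drop ("\n".toList).length ('\n' :: t) = t from by simp]
        rw [ih f [] (cur.reverse :: acc) (by simpa using hf)]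
        simp [pvPieces]
      · simp only [PySem.Chars.splitOn.go]
        rw [if_neg (show ¬ (("\n".toList).isPrefixOf (c :: t) = true) from by
          simp [List.isPrefixOf]
          exact fun hc => h hc.symm)]
        rw [ih f (c :: cur) acc (by simpa using hf)]
        simp [pvPieces, h]

theorem pvSplitOn_eq (cs : List Char) :
    PySem.Chars.splitOn cs "\n".toList = pvPieces [] cs := by
  rw [PySem.Chars.splitOn]
  simpa using pvSplitGo_spec cs (cs.length + 1) [] [] (by omega)

theorem pvFoldl_append_map (i : List Char) (parts : List (List Char)) :
    ∀ (init : List (List Char)),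
      parts.foldl (fun acc line => acc ++ [i ++ line]) init
        = init ++ parts.map (fun line => i ++ line) := by
  induction parts with
  | nil => intro init; simp
  | cons p ps ih => intro init; simp [ih]

theorem pvJoin_cons_of_ne_nil (sep a : List Char) (rest : List (List Char)) (h : rest ≠ []) :
    PySem.Chars.join sep (a :: rest) = a ++ sep ++ PySem.Chars.join sep rest := by
  cases rest with
  | nil => exact absurd rfl h
  | cons b bs => exact PySem.Chars.join_cons_cons sep a b bs

theorem pvJoin_append_last (sep ss : List Char) (xs : List (List Char)) (h : xs ≠ []) :
    PySem.Chars.join sep (xs ++ [ss]) = PySem.Chars.join sep xs ++ sep ++ ss := by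
  induction xs with
  | nil => exact absurd rfl h
  | cons a as ih =>
    cases as with
    | nil => simp [PySem.Chars.join_cons_cons, PySem.Chars.join_singleton]
    | cons b bs =>
      rw [show (a :: b :: bs) ++ [ss] = a :: ((b :: bs) ++ [ss]) from by simp]
      rw [pvJoin_cons_of_ne_nil sep a ((b :: bs) ++ [ss]) (by simp)]
      rw [ih (by simp), PySem.Chars.join_cons_cons]
      simp

theorem pvJoin_pieces (i : List Char) (cur cs : List Char) :
    PySem.Chars.join "\n".toList ((pvPieces cur cs).map (fun line => i ++ line))
      = i ++ cur.reverse ++ pvIndentBody i cs := by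
  induction cs generalizing cur with
  | nil => simp [pvPieces, pvIndentBody, PySem.Chars.join_singleton]
  | cons c t ih =>
    by_cases h : c = '\n'
    · subst h
      rw [show pvPieces cur ('\n' :: t) = cur.reverse :: pvPieces [] t from by
        simp [pvPieces]]
      rw [List.map_cons,
          pvJoin_cons_of_ne_nil "\n".toList (i ++ cur.reverse)
            ((pvPieces [] t).map (fun line => i ++ line))
            (by simp [pvPieces_ne_nil]),
          ih []]
      simp [pvIndentBody]
    · rw [show pvPieces cur (c :: t) = pvPieces (c :: cur) t from by simp [pvPieces, h]]
      rw [ih (c :: cur)]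
      simp [pvIndentBody, h]

-- ===== VERDICT (by name: the statement is the Claim_ definition above) =====
theorem docstring_spec : Claim_equal_docstring := by
  intro description indent _
  unfold Spec_docstring docstring docstring_alt
  by_cases hd : description.toList = []
  · simp [hd]
  · simp only [if_neg hd]
    congr 1
    rw [pvReplace_eq, pvSplitOn_eq, pvFoldl_append_map]
    set i := PySem.List.pyRepeat [' '] indent with hi
    set ss := i ++ "'''".toList with hss
    set L := (pvPieces [] description.toList).map (fun line => i ++ line) with hL
    rw [show ([ss] ++ L ++ [ss]) = ss :: (L ++ [ss]) from by simp]
    rw [pvJoin_cons_of_ne_nil "\n".toList ss (L ++ [ss]) (by simp)]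
    rw [pvJoin_append_last "\n".toList ss L (by simp [hL, pvPieces_ne_nil])]
    rw [hL, pvJoin_pieces i [] description.toList]
    simp [hss]
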